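-- pv_equiv track=rewrite | github.com/tanyinghui/Codility-Lesson | Coding-Questions/negbaseoperation.py | solution
-- ===== SOURCE A (Python) =====
-- def solution(A, B):
--     # write your code in Python 3.6
--     x_str = ''.join(str(e) for e in A)
--     y_str = ''.join(str(e) for e in B)
--     x_dec = convert_to_decimal(x_str)
--     y_dec = convert_to_decimal(y_str)
--     sum_dec = x_dec + y_dec
--     sum_negbase = convert_to_neg(sum_dec)
--     return sum_negbase
--
-- def convert_to_decimal(s):
--     if s == "0":
--         return 0
--     output = 0
--     for i, k in enumerate(s):
--         output += int(k) * (-2)**i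
--     return output
--
-- def convert_to_neg(n):
--     if n == 0:
--         return [0]
--     output = []
--     while n != 0:
--         n, r = divmod(n,-2)
--         if r < 0:
--             n += 1
--             r -= -2
--         output.append(r)
--     return output
-- ===== SOURCE B (Python) =====
-- def solution(A, B):
--     # read the input the same way A does (each element as its decimal digit string),
--     # then add column by column in base -2 with an integer carry: no decimal round trip
--     da = [int(ch) for e in A for ch in str(e)]
--     db = [int(ch) for e in B for ch in str(e)]
--     out = []
--     carry = 0
--     for i in range(max(len(da), len(db))):
--         s = carry
--         if i < len(da):
--             s += da[i]
--         if i < len(db):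
--             s += db[i]
--         d = s % 2
--         out.append(d)
--         carry = (d - s) // 2
--     while carry != 0:
--         d = carry % 2
--         out.append(d)
--         carry = (d - carry) // 2
--     while len(out) > 1 and out[-1] == 0:
--         out.pop()
--     return out if out else [0]
-- ===== Notes on version B (the rewrite author's own statement) =====
-- stated objective: faster
-- what changed: Instead of decoding the joined digit strings to one (potentially huge) decimal integer and re-encoding it, B expands each element into its decimal digits the same way A reads them and adds the two digit lists column by column in base -2 with a small integer carry, then strips high-order zeros.
import Mathlib
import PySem

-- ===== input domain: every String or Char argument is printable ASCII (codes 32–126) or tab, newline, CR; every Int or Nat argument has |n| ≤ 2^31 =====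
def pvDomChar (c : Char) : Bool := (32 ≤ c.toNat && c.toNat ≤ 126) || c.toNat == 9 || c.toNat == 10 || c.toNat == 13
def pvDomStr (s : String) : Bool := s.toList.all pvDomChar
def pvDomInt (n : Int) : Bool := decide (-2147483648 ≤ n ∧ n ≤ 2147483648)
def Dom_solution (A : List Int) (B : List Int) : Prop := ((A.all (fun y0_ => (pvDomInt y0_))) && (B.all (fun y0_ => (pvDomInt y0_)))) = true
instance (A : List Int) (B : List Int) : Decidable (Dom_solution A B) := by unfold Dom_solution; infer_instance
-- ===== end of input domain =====

-- B adds the two digit lists column by column in base -2 with an integer carry,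
-- instead of A's decode-to-decimal-and-re-encode round trip.

-- ===== PORT A =====

-- int(k) for one char k; Python raises ValueError on a non-digit char (such inputs are excluded by Pre_)
def pvCharDigit (k : Char) : Int := (PySem.Int.ofChars? [k]).getD 0

-- convert_to_decimal(s): s as a char list; (-2)**i ported as (-2)^i.toNat (enumerate indices are ≥ 0)
def convertToDecimal (s : List Char) : Int :=
  if s = ['0'] then 0
  else (PySem.List.enumerate s 0).foldl (fun out ik => out + pvCharDigit ik.2 * (-2 : Int) ^ ik.1.toNat) 0

-- fuel bound for the digit-emitting while loops (A's and B's); proved sufficient below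
def negMeasure (n : Int) : Nat := 2 * n.natAbs + (if n < 0 then 1 else 0)

-- the while-loop of convert_to_neg, with a fuel guard that only makes it total
-- (negMeasure strictly decreases, so fuel negMeasure n + 1 is never exhausted);
-- divmod(n, -2) never raises (divisor ≠ 0), so it is ported as floordiv/mod
def convertToNegGo : Nat → Int → List Int
  | 0, _ => []
  | fuel + 1, n =>
    if n = 0 then []
    else if PySem.Int.mod n (-2) < 0 then
      (PySem.Int.mod n (-2) + 2) :: convertToNegGo fuel (PySem.Int.floordiv n (-2) + 1)
    else
      PySem.Int.mod n (-2) :: convertToNegGo fuel (PySem.Int.floordiv n (-2))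

def convertToNeg (n : Int) : List Int :=
  if n = 0 then [0] else convertToNegGo (negMeasure n + 1) n

def solution (A : List Int) (B : List Int) : List Int :=
  let xStr := A.flatMap (fun e => PySem.Int.toChars e)   -- ''.join(str(e) for e in A)
  let yStr := B.flatMap (fun e => PySem.Int.toChars e)
  let xDec := convertToDecimal xStr
  let yDec := convertToDecimal yStr
  convertToNeg (xDec + yDec)

-- ===== PORT B =====

-- the trailing 'while carry != 0' loop of Source B (fuel guard as above; never exhausted)
def pvFlushGo : Nat → Int → List Int
  | 0, _ => []
  | fuel + 1, c =>
    if c = 0 then []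
    else PySem.Int.mod c 2 ::
      pvFlushGo fuel (PySem.Int.floordiv (PySem.Int.mod c 2 - c) 2)

def pvFlush (c : Int) : List Int := pvFlushGo (negMeasure c + 1) c

-- the 'for i in range(max(len(A), len(B)))' loop of Source B, one column per step
def pvColsB : List Int → Int → List Int
  | [], c => pvFlush c
  | b :: bs, c =>
      PySem.Int.mod (b + c) 2 ::
        pvColsB bs (PySem.Int.floordiv (PySem.Int.mod (b + c) 2 - (b + c)) 2)

def pvColumns : List Int → List Int → Int → List Int
  | [], bs, c => pvColsB bs c
  | a :: as, [], c =>
      PySem.Int.mod (a + c) 2 ::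
        pvColumns as [] (PySem.Int.floordiv (PySem.Int.mod (a + c) 2 - (a + c)) 2)
  | a :: as, b :: bs, c =>
      PySem.Int.mod (a + b + c) 2 ::
        pvColumns as bs (PySem.Int.floordiv (PySem.Int.mod (a + b + c) 2 - (a + b + c)) 2)

-- the 'while len(out) > 1 and out[-1] == 0: out.pop()' loop of Source B (fuel = length suffices)
def pvStripGo : Nat → List Int → List Int
  | 0, l => l
  | fuel + 1, l =>
    if 1 < l.length ∧ l.getLast? = some 0 then pvStripGo fuel l.dropLast else l

def pvStrip (l : List Int) : List Int := pvStripGo l.length l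

-- the digit expansion '[int(ch) for e in A for ch in str(e)]' of Source B
-- (pvCharDigit is the shared port of one-char int(); on '-' Python raises ValueError, outside Pre_)
def pvDigits (A : List Int) : List Int :=
  A.flatMap (fun e => (PySem.Int.toChars e).map pvCharDigit)

def solution_alt (A : List Int) (B : List Int) : List Int :=
  let out := pvStrip (pvColumns (pvDigits A) (pvDigits B) 0)
  if out = [] then [0] else out

-- ===== PRECONDITION & SPEC =====
-- Pre_ excludes exactly the inputs on which Python A raises: a negative element makes
-- int('-') fail with ValueError while re-parsing the joined digit string (so does B's int(ch)).
def Pre_solution (A : List Int) (B : List Int) : Prop :=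
  ∀ e ∈ A ++ B, 0 ≤ e
instance (A : List Int) (B : List Int) : Decidable (Pre_solution A B) := by unfold Pre_solution; infer_instance
def pvWitness_solution : List Int × List Int := ([1, 0, 0, 1, 1], [12, 1, 0, 1])

def Spec_solution (A : List Int) (B : List Int) (out : List Int) : Prop := out = solution_alt A B
instance (A : List Int) (B : List Int) (out : List Int) : Decidable (Spec_solution A B out) := by unfold Spec_solution; infer_instance

-- ===== CLAIM (what is proved, stated in full; the proofs are below) =====
def Claim_equal_solution : Prop := ∀ (A : List Int) (B : List Int), Dom_solution A B → Pre_solution A B → Spec_solution A B (solution A B)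
-- ===== LEMMAS AND PROOFS =====

-- little-endian base -2 value of a digit list
def pvVal : List Int → Int
  | [] => 0
  | d :: ds => d + (-2) * pvVal ds

-- canonical negabinary representation of n
def pvCanon (l : List Int) (n : Int) : Prop :=
  pvVal l = n ∧ (∀ d ∈ l, d = 0 ∨ d = 1) ∧ (l = [0] ∨ (l ≠ [] ∧ l.getLast? ≠ some 0))

theorem negMeasure_lt (n n' r' : Int) (hn : n ≠ 0) (h : n = n' * (-2) + r')
    (h0 : 0 ≤ r') (h1 : r' ≤ 1) : negMeasure n' < negMeasure n := by
  unfold negMeasure; split_ifs <;> omega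

theorem pvGetLast?_cons_ne (x : Int) (u : List Int) (hu : u ≠ []) :
    (x :: u).getLast? = u.getLast? := by
  cases u with
  | nil => exact absurd rfl hu
  | cons y u' => simp [List.getLast?_cons_cons]

theorem pvNe_nil_of_getLast?_one (u : List Int) (h : u.getLast? = some 1) : u ≠ [] := by
  intro hnil; rw [hnil] at h; simp at h

-- ---- shared carry step facts ----
theorem pvCarry_step (s : Int) :
    s = PySem.Int.floordiv (PySem.Int.mod s 2 - s) 2 * (-2) + PySem.Int.mod s 2 ∧
    0 ≤ PySem.Int.mod s 2 ∧ PySem.Int.mod s 2 ≤ 1 := by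
  have hm := PySem.Int.floordiv_mul_add_mod s 2
  have h1 := PySem.Int.mod_nonneg s (b := 2) (by norm_num)
  have h2 := PySem.Int.mod_lt s (b := 2) (by norm_num)
  have hdvd : PySem.Int.mod (PySem.Int.mod s 2 - s) 2 = 0 := by
    rw [PySem.Int.mod_eq_zero_iff_dvd]
    exact ⟨-(PySem.Int.floordiv s 2), by omega⟩
  have he := PySem.Int.floordiv_mul_add_mod (PySem.Int.mod s 2 - s) 2
  omega

-- ---- B side: pvFlushGo ----

theorem pvFlushGo_val (fuel : Nat) (c : Int) (hf : negMeasure c < fuel) :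
    pvVal (pvFlushGo fuel c) = c := by
  induction fuel generalizing c with
  | zero => omega
  | succ fuel ih =>
    by_cases hc : c = 0
    · simp [pvFlushGo, hc, pvVal]
    · obtain ⟨heq, h0, h1⟩ := pvCarry_step c
      have hlt := negMeasure_lt c _ _ hc heq h0 h1
      have hrec := ih (PySem.Int.floordiv (PySem.Int.mod c 2 - c) 2) (by omega)
      rw [pvFlushGo, if_neg hc]
      simp only [pvVal, hrec]
      omega

theorem pvFlushGo_digits (fuel : Nat) (c : Int) :
    ∀ d ∈ pvFlushGo fuel c, d = 0 ∨ d = 1 := by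
  induction fuel generalizing c with
  | zero => simp [pvFlushGo]
  | succ fuel ih =>
    by_cases hc : c = 0
    · simp [pvFlushGo, hc]
    · obtain ⟨heq, h0, h1⟩ := pvCarry_step c
      rw [pvFlushGo, if_neg hc]
      intro d hd
      rcases List.mem_cons.mp hd with h | h
      · omega
      · exact ih _ d h

-- ---- B side: the column loop ----

theorem pvColsB_val (bs : List Int) (c : Int) :
    pvVal (pvColsB bs c) = pvVal bs + c := by
  induction bs generalizing c with
  | nil =>
    simp [pvColsB, pvVal, pvFlush, pvFlushGo_val (negMeasure c + 1) c (by omega)]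
  | cons b bs ih =>
    obtain ⟨heq, h0, h1⟩ := pvCarry_step (b + c)
    simp only [pvColsB, pvVal, ih]
    omega

theorem pvColsB_digits (bs : List Int) (c : Int) :
    ∀ d ∈ pvColsB bs c, d = 0 ∨ d = 1 := by
  induction bs generalizing c with
  | nil => exact fun d hd => pvFlushGo_digits _ _ d hd
  | cons b bs ih =>
    obtain ⟨heq, h0, h1⟩ := pvCarry_step (b + c)
    intro d hd
    rcases List.mem_cons.mp hd with h | h
    · omega
    · exact ih _ d h

theorem pvColumns_val (as bs : List Int) (c : Int) :
    pvVal (pvColumns as bs c) = pvVal as + pvVal bs + c := by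
  induction as generalizing bs c with
  | nil => simp only [pvColumns, pvColsB_val, pvVal]; omega
  | cons a as ih =>
    cases bs with
    | nil =>
      obtain ⟨heq, h0, h1⟩ := pvCarry_step (a + c)
      simp only [pvColumns, pvVal, ih]
      omega
    | cons b bs =>
      obtain ⟨heq, h0, h1⟩ := pvCarry_step (a + b + c)
      simp only [pvColumns, pvVal, ih]
      omega

theorem pvColumns_digits (as bs : List Int) (c : Int) :
    ∀ d ∈ pvColumns as bs c, d = 0 ∨ d = 1 := by
  induction as generalizing bs c with
  | nil => exact fun d hd => pvColsB_digits bs c d hd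
  | cons a as ih =>
    cases bs with
    | nil =>
      obtain ⟨heq, h0, h1⟩ := pvCarry_step (a + c)
      intro d hd
      rcases List.mem_cons.mp hd with h | h
      · omega
      · exact ih [] _ d h
    | cons b bs =>
      obtain ⟨heq, h0, h1⟩ := pvCarry_step (a + b + c)
      intro d hd
      rcases List.mem_cons.mp hd with h | h
      · omega
      · exact ih bs _ d h

-- ---- B side: the strip loop ----

theorem pvVal_append_zero (l : List Int) : pvVal (l ++ [0]) = pvVal l := by
  induction l with
  | nil => simp [pvVal]
  | cons a t ih => simp only [List.cons_append, pvVal, ih]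

theorem pvVal_dropLast (l : List Int) (h : l.getLast? = some 0) :
    pvVal l.dropLast = pvVal l := by
  have hne : l ≠ [] := by intro hnil; rw [hnil] at h; simp at h
  have hdecomp : l.dropLast ++ [l.getLast hne] = l := List.dropLast_concat_getLast hne
  have hlast : l.getLast hne = 0 := by
    have h2 := List.getLast?_eq_some_getLast (l := l) hne
    rw [h2] at h
    exact Option.some.inj h
  calc pvVal l.dropLast = pvVal (l.dropLast ++ [0]) := (pvVal_append_zero _).symm
    _ = pvVal l := by rw [← hlast, hdecomp]

theorem pvStripGo_val (fuel : Nat) (l : List Int) : pvVal (pvStripGo fuel l) = pvVal l := by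
  induction fuel generalizing l with
  | zero => rfl
  | succ fuel ih =>
    rw [pvStripGo]
    split_ifs with h
    · rw [ih, pvVal_dropLast l h.2]
    · rfl

theorem pvStripGo_mem (fuel : Nat) (l : List Int) : ∀ d ∈ pvStripGo fuel l, d ∈ l := by
  induction fuel generalizing l with
  | zero => intro d hd; exact hd
  | succ fuel ih =>
    rw [pvStripGo]
    split_ifs with h
    · intro d hd
      exact List.dropLast_subset l (ih _ d hd)
    · intro d hd; exact hd

theorem pvStripGo_spec (fuel : Nat) (l : List Int) (hf : l.length ≤ fuel) :
    ¬ (1 < (pvStripGo fuel l).length ∧ (pvStripGo fuel l).getLast? = some 0) := by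
  induction fuel generalizing l with
  | zero =>
    have : l = [] := List.length_eq_zero_iff.mp (by omega)
    subst this
    simp [pvStripGo]
  | succ fuel ih =>
    rw [pvStripGo]
    split_ifs with h
    · exact ih l.dropLast (by simp [List.length_dropLast]; omega)
    · exact h

-- ---- B side: the result is canonical ----

theorem pvOut_canon (A B : List Int) :
    pvCanon (if pvStrip (pvColumns A B 0) = [] then [0] else pvStrip (pvColumns A B 0))
      (pvVal A + pvVal B) := by
  have hval : pvVal (pvStrip (pvColumns A B 0)) = pvVal A + pvVal B := by
    unfold pvStrip
    rw [pvStripGo_val, pvColumns_val]; ring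
  have hdig : ∀ d ∈ pvStrip (pvColumns A B 0), d = 0 ∨ d = 1 := by
    intro d hd
    exact pvColumns_digits A B 0 d (pvStripGo_mem _ _ d hd)
  have hspec := pvStripGo_spec (pvColumns A B 0).length (pvColumns A B 0) (le_refl _)
  by_cases hnil : pvStrip (pvColumns A B 0) = []
  · rw [if_pos hnil]
    rw [hnil] at hval
    simp only [pvVal] at hval
    exact ⟨by simp [pvVal]; omega, by simp, Or.inl rfl⟩
  · rw [if_neg hnil]
    refine ⟨hval, hdig, ?_⟩
    by_cases hlen : 1 < (pvStrip (pvColumns A B 0)).length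
    · have hne0 : (pvStrip (pvColumns A B 0)).getLast? ≠ some 0 := fun hx => hspec ⟨hlen, hx⟩
      exact Or.inr ⟨hnil, hne0⟩
    · have h1 : (pvStrip (pvColumns A B 0)).length = 1 := by
        have := List.length_pos_iff.mpr hnil
        omega
      obtain ⟨d, hd⟩ := List.length_eq_one_iff.mp h1
      rcases hdig d (by rw [hd]; exact List.mem_cons_self) with h0 | h0
      · exact Or.inl (by rw [hd, h0])
      · refine Or.inr ⟨hnil, ?_⟩
        rw [hd, h0]
        simp

-- ---- A side: convert_to_neg is canonical ----

theorem pvNegStep (n : Int) :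
    (PySem.Int.mod n (-2) < 0 →
      n = (PySem.Int.floordiv n (-2) + 1) * (-2) + (PySem.Int.mod n (-2) + 2) ∧
      0 ≤ PySem.Int.mod n (-2) + 2 ∧ PySem.Int.mod n (-2) + 2 ≤ 1) ∧
    (¬ PySem.Int.mod n (-2) < 0 →
      n = PySem.Int.floordiv n (-2) * (-2) + PySem.Int.mod n (-2) ∧
      0 ≤ PySem.Int.mod n (-2) ∧ PySem.Int.mod n (-2) ≤ 1) := by
  have hb := PySem.Int.mod_neg_bounds n (b := -2) (by norm_num)
  have hd := PySem.Int.floordiv_mul_add_mod n (-2)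
  constructor <;> intro h <;> refine ⟨by omega, by omega, by omega⟩

theorem pvGo_val (fuel : Nat) (n : Int) (hf : negMeasure n < fuel) :
    pvVal (convertToNegGo fuel n) = n := by
  induction fuel generalizing n with
  | zero => omega
  | succ fuel ih =>
    by_cases hn : n = 0
    · simp [convertToNegGo, hn, pvVal]
    · obtain ⟨hneg, hpos⟩ := pvNegStep n
      rw [convertToNegGo, if_neg hn]
      split_ifs with hr
      · obtain ⟨heq, h0, h1⟩ := hneg hr
        have hlt := negMeasure_lt n _ _ hn heq h0 h1
        have hrec := ih (PySem.Int.floordiv n (-2) + 1) (by omega)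
        simp only [pvVal, hrec]
        omega
      · obtain ⟨heq, h0, h1⟩ := hpos hr
        have hlt := negMeasure_lt n _ _ hn heq h0 h1
        have hrec := ih (PySem.Int.floordiv n (-2)) (by omega)
        simp only [pvVal, hrec]
        omega

theorem pvGo_digits (fuel : Nat) (n : Int) : ∀ d ∈ convertToNegGo fuel n, d = 0 ∨ d = 1 := by
  induction fuel generalizing n with
  | zero => simp [convertToNegGo]
  | succ fuel ih =>
    by_cases hn : n = 0
    · simp [convertToNegGo, hn]
    · obtain ⟨hneg, hpos⟩ := pvNegStep n
      rw [convertToNegGo, if_neg hn]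
      split_ifs with hr
      · obtain ⟨heq, h0, h1⟩ := hneg hr
        intro d hd
        rcases List.mem_cons.mp hd with h | h
        · omega
        · exact ih _ d h
      · obtain ⟨heq, h0, h1⟩ := hpos hr
        intro d hd
        rcases List.mem_cons.mp hd with h | h
        · omega
        · exact ih _ d h

theorem pvGo_zero (fuel : Nat) : convertToNegGo fuel 0 = [] := by
  cases fuel <;> simp [convertToNegGo]

theorem pvGo_last (fuel : Nat) (n : Int) (hf : negMeasure n < fuel) (hn : n ≠ 0) :
    (convertToNegGo fuel n).getLast? = some 1 := by
  induction fuel generalizing n with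
  | zero => omega
  | succ fuel ih =>
    obtain ⟨hneg, hpos⟩ := pvNegStep n
    rw [convertToNegGo, if_neg hn]
    split_ifs with hr
    · obtain ⟨heq, h0, h1⟩ := hneg hr
      have hlt := negMeasure_lt n _ _ hn heq h0 h1
      by_cases hz : PySem.Int.floordiv n (-2) + 1 = 0
      · rw [hz] at heq ⊢
        have hd1 : PySem.Int.mod n (-2) + 2 = 1 := by omega
        rw [pvGo_zero, hd1]
        rfl
      · have htail := ih _ (by omega) hz
        rw [pvGetLast?_cons_ne _ _ (pvNe_nil_of_getLast?_one _ htail), htail]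
    · obtain ⟨heq, h0, h1⟩ := hpos hr
      have hlt := negMeasure_lt n _ _ hn heq h0 h1
      by_cases hz : PySem.Int.floordiv n (-2) = 0
      · have hb := PySem.Int.mod_neg_bounds n (b := -2) (by norm_num)
        exact absurd (by omega : n = 0) hn
      · have htail := ih _ (by omega) hz
        rw [pvGetLast?_cons_ne _ _ (pvNe_nil_of_getLast?_one _ htail), htail]

theorem pvConvNeg_canon (n : Int) : pvCanon (convertToNeg n) n := by
  unfold convertToNeg
  by_cases h : n = 0
  · rw [if_pos h]
    exact ⟨by simp [pvVal, h], by simp, Or.inl rfl⟩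
  · rw [if_neg h]
    refine ⟨pvGo_val (negMeasure n + 1) n (by omega), pvGo_digits _ n, Or.inr ⟨?_, ?_⟩⟩
    · intro hnil
      have := pvGo_last (negMeasure n + 1) n (by omega) h
      rw [hnil] at this; simp at this
    · rw [pvGo_last (negMeasure n + 1) n (by omega) h]; simp

-- ---- uniqueness of the canonical representation ----

theorem pvVal_ne_zero (l : List Int) (hd : ∀ d ∈ l, d = 0 ∨ d = 1)
    (hl : l.getLast? = some 1) : pvVal l ≠ 0 := by
  induction l with
  | nil => simp at hl
  | cons a t ih =>
    cases t with
    | nil =>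
      simp [List.getLast?] at hl
      simp [pvVal, hl]
    | cons b t' =>
      have hlt : (b :: t').getLast? = some 1 := by
        simpa [List.getLast?_cons_cons] using hl
      have hne := ih (fun d hdm => hd d (List.mem_cons_of_mem _ hdm)) hlt
      have ha := hd a List.mem_cons_self
      have hstep : pvVal (a :: b :: t') = a + (-2) * pvVal (b :: t') := rfl
      rw [hstep]
      omega

theorem pvTailLast_one (u : List Int) (hu : u ≠ []) (hdu : ∀ d ∈ u, d = 0 ∨ d = 1)
    (hlu : u.getLast? ≠ some 0) : u.getLast? = some 1 := by
  obtain ⟨x, hx⟩ := Option.isSome_iff_exists.mp (List.getLast?_isSome.mpr hu)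
  have hmem : x ∈ u := List.mem_of_getLast? hx
  rcases hdu x hmem with h0 | h1
  · subst h0; exact absurd hx hlu
  · subst h1; exact hx

theorem pvCanon_unique (l1 l2 : List Int) (n : Int)
    (h1 : pvCanon l1 n) (h2 : pvCanon l2 n) : l1 = l2 := by
  induction l1 generalizing l2 n with
  | nil =>
    rcases h1 with ⟨_, _, h | ⟨h, _⟩⟩ <;> simp at h
  | cons a t ih =>
    obtain ⟨hv1, hd1, hs1⟩ := h1
    obtain ⟨hv2, hd2, hs2⟩ := h2
    cases l2 with
    | nil => rcases hs2 with h | ⟨h, _⟩ <;> simp at h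
    | cons b t2 =>
      have ha := hd1 a List.mem_cons_self
      have hb := hd2 b List.mem_cons_self
      have hu1 : pvVal (a :: t) = a + (-2) * pvVal t := rfl
      have hu2 : pvVal (b :: t2) = b + (-2) * pvVal t2 := rfl
      rw [hu1] at hv1
      rw [hu2] at hv2
      have hab : a = b := by omega
      have hvt : pvVal t = pvVal t2 := by omega
      subst hab
      by_cases ht : t = []
      · subst ht
        by_cases ht2 : t2 = []
        · subst ht2; rfl
        · exfalso
          have hne0 : t2.getLast? ≠ some 0 := by
            rcases hs2 with h | ⟨_, h⟩
            · have : t2 = [] := by simpa using congrArg List.tail h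
              exact absurd this ht2
            · rw [← pvGetLast?_cons_ne a t2 ht2]; exact h
          have h1t : t2.getLast? = some 1 :=
            pvTailLast_one t2 ht2 (fun d hdm => hd2 d (List.mem_cons_of_mem _ hdm)) hne0
          have := pvVal_ne_zero t2 (fun d hdm => hd2 d (List.mem_cons_of_mem _ hdm)) h1t
          simp [pvVal] at hvt
          omega
      · by_cases ht2 : t2 = []
        · subst ht2
          exfalso
          have hne0 : t.getLast? ≠ some 0 := by
            rcases hs1 with h | ⟨_, h⟩
            · have : t = [] := by simpa using congrArg List.tail h
              exact absurd this ht
            · rw [← pvGetLast?_cons_ne a t ht]; exact h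
          have h1t : t.getLast? = some 1 :=
            pvTailLast_one t ht (fun d hdm => hd1 d (List.mem_cons_of_mem _ hdm)) hne0
          have := pvVal_ne_zero t (fun d hdm => hd1 d (List.mem_cons_of_mem _ hdm)) h1t
          simp [pvVal] at hvt
          omega
        · have hc1 : pvCanon t (pvVal t) := by
            refine ⟨rfl, fun d hdm => hd1 d (List.mem_cons_of_mem _ hdm), Or.inr ⟨ht, ?_⟩⟩
            rcases hs1 with h | ⟨_, h⟩
            · have : t = [] := by simpa using congrArg List.tail h
              exact absurd this ht
            · rw [← pvGetLast?_cons_ne a t ht]; exact h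
          have hc2 : pvCanon t2 (pvVal t) := by
            refine ⟨hvt.symm, fun d hdm => hd2 d (List.mem_cons_of_mem _ hdm), Or.inr ⟨ht2, ?_⟩⟩
            rcases hs2 with h | ⟨_, h⟩
            · have : t2 = [] := by simpa using congrArg List.tail h
              exact absurd this ht2
            · rw [← pvGetLast?_cons_ne a t2 ht2]; exact h
          rw [ih t2 (pvVal t) hc1 hc2]

-- ---- A side: the decimal decode equals pvVal on digit lists ----

-- base -2 value read from the characters
def pvCval : List Char → Int
  | [] => 0
  | c :: cs => pvCharDigit c + (-2) * pvCval cs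

theorem pvFoldEnum (s : List Char) : ∀ (i acc : Int), 0 ≤ i →
    (PySem.List.enumerate s i).foldl
        (fun out ik => out + pvCharDigit ik.2 * (-2 : Int) ^ ik.1.toNat) acc
      = acc + (-2 : Int) ^ i.toNat * pvCval s := by
  induction s with
  | nil => intro i acc hi; simp [PySem.List.enumerate_nil, pvCval]
  | cons c cs ih =>
    intro i acc hi
    rw [PySem.List.enumerate_cons]
    simp only [List.foldl_cons]
    rw [ih (i + 1) _ (by omega)]
    have ht : (i + 1).toNat = i.toNat + 1 := by omega
    rw [ht, pow_succ]
    simp only [pvCval]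
    ring

theorem pvConvDec_eq_cval (s : List Char) : convertToDecimal s = pvCval s := by
  unfold convertToDecimal
  by_cases h : s = ['0']
  · rw [if_pos h, h]
    simp [pvCval, show pvCharDigit '0' = 0 from by decide]
  · rw [if_neg h, pvFoldEnum s 0 0 (by norm_num)]
    simp

theorem pvVal_map_charDigit (cs : List Char) :
    pvVal (cs.map pvCharDigit) = pvCval cs := by
  induction cs with
  | nil => rfl
  | cons c cs ih => simp only [List.map_cons, pvVal, pvCval, ih]

theorem pvDigits_val (A : List Int) :
    pvVal (pvDigits A) = pvCval (A.flatMap (fun e => PySem.Int.toChars e)) := by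
  unfold pvDigits
  rw [← List.map_flatMap, pvVal_map_charDigit]

-- ===== VERDICT (by name: the statement is the Claim_ definition above) =====
theorem solution_spec : Claim_equal_solution := by
  intro A B hdom hpre
  show solution A B = solution_alt A B
  have hsolA : solution A B
      = convertToNeg (convertToDecimal (A.flatMap (fun e => PySem.Int.toChars e))
          + convertToDecimal (B.flatMap (fun e => PySem.Int.toChars e))) := rfl
  rw [hsolA, pvConvDec_eq_cval, pvConvDec_eq_cval, ← pvDigits_val, ← pvDigits_val]
  exact pvCanon_unique _ _ (pvVal (pvDigits A) + pvVal (pvDigits B))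
    (pvConvNeg_canon _)
    (show pvCanon (solution_alt A B) _ from pvOut_canon (pvDigits A) (pvDigits B))
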